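-- pv_equiv track=rewrite | github.com/number571/Python | GUI_Scripts/Templates/cryptomod.py | couples
-- ===== SOURCE A (Python) =====
-- def couples(message):
--     keys = {
--         'A':'B','C':'D','E':'F','G':'H','I':'J','K':'L',
--         'M':'N','O':'P','Q':'R','S':'T','U':'V','W':'X',
--         'Y':'Z'}
--     message = list(message.upper())
--     for symbol in range(len(message)):
--         for key in keys:
--             if message[symbol] == key:
--                 message[symbol] = keys[key]
--             elif message[symbol] == keys[key]:
--                 message[symbol] = key
--     return "".join(message)
-- ===== SOURCE B (Python) =====
-- def couples(message):
--     return "".join(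
--         chr(ord('A') + ((ord(c) - ord('A')) ^ 1)) if 'A' <= c <= 'Z' else c
--         for c in message.upper())
-- ===== Notes on version B (the rewrite author's own statement) =====
-- stated objective: simpler
-- what changed: Replaces the index loop with a nested 13-pair dictionary scan per character by a single comprehension that pairs each letter arithmetically via XOR 1 on its alphabet offset.
import Mathlib
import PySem

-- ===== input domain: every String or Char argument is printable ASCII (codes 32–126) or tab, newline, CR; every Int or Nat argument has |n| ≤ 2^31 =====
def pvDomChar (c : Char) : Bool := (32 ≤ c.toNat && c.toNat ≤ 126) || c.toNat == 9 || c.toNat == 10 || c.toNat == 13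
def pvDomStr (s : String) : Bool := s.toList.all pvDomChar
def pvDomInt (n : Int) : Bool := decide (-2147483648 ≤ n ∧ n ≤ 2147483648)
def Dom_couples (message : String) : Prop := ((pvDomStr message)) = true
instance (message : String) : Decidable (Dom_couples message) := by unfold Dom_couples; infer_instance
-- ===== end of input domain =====

-- B replaces A's per-character scan over the 13-pair dict by a single pass emitting the
-- XOR-1 alphabet partner; objective: simpler.

-- ===== PORT A =====
-- the dict literal `keys`
def couplesDict : PySem.Dict Char Char :=
  PySem.Dict.ofList [('A','B'),('C','D'),('E','F'),('G','H'),('I','J'),('K','L'),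
                     ('M','N'),('O','P'),('Q','R'),('S','T'),('U','V'),('W','X'),('Y','Z')]

-- the inner `for key in keys: if message[symbol]==key … elif message[symbol]==keys[key] …`
def couplesInner (c : Char) : Char :=
  couplesDict.keys.foldl
    (fun m key =>
      if m = key then couplesDict.getD key ' '
      else if m = couplesDict.getD key ' ' then key
      else m) c

def couples (message : String) : String :=
  let msg := (PySem.Str.upper message).toList
  let msg := (PySem.List.pyRange 0 msg.length 1).foldl
      (fun m i => m.set i.toNat (couplesInner (PySem.List.pyGetD m i ' '))) msg
  String.mk msg

-- ===== PORT B =====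
def couples_alt (message : String) : String :=
  String.mk ((PySem.Str.upper message).toList.map
    (fun c => if 'A' ≤ c ∧ c ≤ 'Z'
              then Char.ofNat ('A'.toNat + ((c.toNat - 'A'.toNat) ^^^ 1))
              else c))

-- ===== PRECONDITION & SPEC =====
def Spec_couples (message : String) (out : String) : Prop := out = couples_alt message
instance (message : String) (out : String) : Decidable (Spec_couples message out) := by unfold Spec_couples; infer_instance

-- ===== CLAIM (what is proved, stated in full; the proofs are below) =====
def Claim_equal_couples : Prop := ∀ (message : String), Dom_couples message → Spec_couples message (couples message)

-- ===== LEMMAS AND PROOFS =====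

-- A's index loop that overwrites each cell once, left to right, is a map.
lemma couples_loop_eq (f : Char → Char) :
    ∀ (suf pre : List Char),
      (PySem.List.pyRange pre.length (pre.length + suf.length) 1).foldl
        (fun m i => m.set i.toNat (f (PySem.List.pyGetD m i ' '))) (pre ++ suf)
      = pre ++ suf.map f := by
  intro suf
  induction suf with
  | nil => intro pre; simp [PySem.List.pyRange_one_eq_nil]
  | cons c rest ih =>
    intro pre
    rw [PySem.List.pyRange_one_cons (by simp only [List.length_cons]; push_cast; omega)]
    simp only [List.foldl_cons]
    have hget : PySem.List.pyGetD (pre ++ c :: rest) (pre.length : Int) ' ' = c := by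
      rw [PySem.List.pyGetD_natCast]
      simp [List.getD_append_right]
    have hset : (pre ++ c :: rest).set ((pre.length : Int)).toNat (f c)
        = (pre ++ [f c]) ++ rest := by
      simp [List.set_append]
    rw [hget, hset]
    rw [show ((pre.length : Int) + ((c :: rest).length : Int))
          = ((pre ++ [f c]).length : Int) + ((rest.length : Int)) by
        simp [List.length_cons]; ring]
    rw [show ((pre.length : Int) + 1) = ((pre ++ [f c]).length : Int) by simp]
    have h2 := ih (pre ++ [f c])
    rw [h2]
    simp

set_option maxHeartbeats 2000000 in
lemma upperChar_le (c : Char) (h : c.toNat ≤ 126) :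
    (PySem.Chars.upperChar c).toNat ≤ 126 := by
  have := Char.ofNat_toNat c
  rw [← this]
  generalize c.toNat = t at h ⊢
  interval_cases t <;> decide

-- per-character agreement of A's 13-pair scan with B's XOR-1 pairing, on ASCII
set_option maxHeartbeats 4000000 in
lemma couplesInner_eq (c : Char) (h : c.toNat ≤ 126) :
    couplesInner c
      = (if 'A' ≤ c ∧ c ≤ 'Z'
         then Char.ofNat ('A'.toNat + ((c.toNat - 'A'.toNat) ^^^ 1))
         else c) := by
  have := Char.ofNat_toNat c
  rw [← this]
  generalize c.toNat = t at h ⊢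
  interval_cases t <;> decide

-- ===== VERDICT (by name: the statement is the Claim_ definition above) =====
set_option maxHeartbeats 1000000 in
theorem couples_spec : Claim_equal_couples := by
  intro message hdom
  unfold Spec_couples couples couples_alt
  dsimp only
  have h0 := couples_loop_eq couplesInner ((PySem.Str.upper message).toList) []
  simp only [List.length_nil, List.nil_append, Nat.cast_zero, Int.zero_add, zero_add] at h0
  rw [h0]
  refine congrArg String.mk (List.map_congr_left ?_)
  intro c hc
  rw [PySem.Str.toList_upper] at hc
  obtain ⟨c0, hc0, rfl⟩ := List.mem_map.mp hc
  have hdc : pvDomChar c0 = true := by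
    have := (List.all_eq_true.mp hdom) c0 hc0
    simpa using this
  have hb : c0.toNat ≤ 126 := by
    unfold pvDomChar at hdc
    simp only [Bool.or_eq_true, Bool.and_eq_true, decide_eq_true_eq, beq_iff_eq] at hdc
    omega
  exact couplesInner_eq _ (upperChar_le c0 hb)
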